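-- pv_equiv track=rewrite | github.com/mikekutzma/kwabsim | cavitySolverMain.py | check_actions
-- ===== SOURCE A (Python) =====
-- def check_actions(cavity):
--     # checks if cavity requires at least two graphs
--
--     action = [0,0,0]
--
--     for optic in cavity:
--
--         if ((optic[0]=='Cx') or (optic[0]=='Cy')):
--             action[0] = 1
--
--         elif (optic[0]=='B'):
--             action[1] = 1
--
--         elif (optic[0] == 'X'):
--             action[2] = 1
--
--     return action
-- ===== SOURCE B (Python) =====
-- def check_actions(cavity):
--     # checks if cavity requires at least two graphs
--     return [int(any(o[0] in ('Cx', 'Cy') for o in cavity)),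
--             int(any(o[0] == 'B' for o in cavity)),
--             int(any(o[0] == 'X' for o in cavity))]
-- ===== Notes on version B (the rewrite author's own statement) =====
-- stated objective: idiomatic
-- what changed: Replaced the single mutating-flags loop with three independent declarative any() queries, one per flag.
import Mathlib
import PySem

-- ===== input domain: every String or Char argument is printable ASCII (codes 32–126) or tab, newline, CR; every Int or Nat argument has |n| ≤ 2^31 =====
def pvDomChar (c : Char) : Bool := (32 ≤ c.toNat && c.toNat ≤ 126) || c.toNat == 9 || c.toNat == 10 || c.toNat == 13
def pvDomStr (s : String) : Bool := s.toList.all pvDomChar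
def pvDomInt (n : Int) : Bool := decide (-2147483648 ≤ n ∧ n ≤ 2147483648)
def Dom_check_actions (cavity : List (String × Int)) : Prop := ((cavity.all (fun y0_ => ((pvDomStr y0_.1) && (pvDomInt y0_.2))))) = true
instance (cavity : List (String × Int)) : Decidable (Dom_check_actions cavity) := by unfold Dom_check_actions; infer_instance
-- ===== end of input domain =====

-- B replaces A's single mutating-flags loop with three independent any() scans (idiomatic decomposition).

-- ===== PORT A =====
-- one loop step: update the three flags held as a triple (the mutable list action)
def check_actions_step (action : Int × Int × Int) (optic : String × Int) : Int × Int × Int :=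
  if optic.1 = "Cx" ∨ optic.1 = "Cy" then (1, action.2.1, action.2.2)
  else if optic.1 = "B" then (action.1, 1, action.2.2)
  else if optic.1 = "X" then (action.1, action.2.1, 1)
  else action

def check_actions (cavity : List (String × Int)) : List Int :=
  let action := cavity.foldl check_actions_step (0, 0, 0)
  [action.1, action.2.1, action.2.2]

-- ===== PORT B =====
def check_actions_alt (cavity : List (String × Int)) : List Int :=
  [if cavity.any (fun o => o.1 = "Cx" ∨ o.1 = "Cy") then 1 else 0,
   if cavity.any (fun o => o.1 = "B") then 1 else 0,
   if cavity.any (fun o => o.1 = "X") then 1 else 0]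

-- ===== PRECONDITION & SPEC =====
def Spec_check_actions (cavity : List (String × Int)) (out : List Int) : Prop := out = check_actions_alt cavity
instance (cavity : List (String × Int)) (out : List Int) : Decidable (Spec_check_actions cavity out) := by unfold Spec_check_actions; infer_instance

-- ===== CLAIM (what is proved, stated in full; the proofs are below) =====
def Claim_equal_check_actions : Prop := ∀ (cavity : List (String × Int)), Dom_check_actions cavity → Spec_check_actions cavity (check_actions cavity)

-- ===== LEMMAS AND PROOFS =====

-- loop invariant: starting from any flags, each flag ends 1 iff it started 1 or its trigger occurs
theorem check_actions_foldl (cavity : List (String × Int)) (a : Int × Int × Int) :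
    cavity.foldl check_actions_step a =
      ((if cavity.any (fun o => o.1 = "Cx" ∨ o.1 = "Cy") then 1 else a.1),
       (if cavity.any (fun o => o.1 = "B") then 1 else a.2.1),
       (if cavity.any (fun o => o.1 = "X") then 1 else a.2.2)) := by
  induction cavity generalizing a with
  | nil => rfl
  | cons hd tl ih =>
    obtain ⟨s, n⟩ := hd
    rw [List.foldl_cons, ih]
    by_cases h1 : s = "Cx" ∨ s = "Cy"
    · rcases h1 with h | h <;> subst h <;>
        exact Prod.ext_iff.mpr ⟨ite_self _, rfl⟩
    · by_cases h2 : s = "B"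
      · subst h2
        exact Prod.ext_iff.mpr ⟨rfl, Prod.ext_iff.mpr ⟨ite_self _, rfl⟩⟩
      · by_cases h3 : s = "X"
        · subst h3
          exact Prod.ext_iff.mpr ⟨rfl, Prod.ext_iff.mpr ⟨rfl, ite_self _⟩⟩
        · unfold check_actions_step
          rw [List.any_cons, List.any_cons, List.any_cons,
              if_neg h1, if_neg h2, if_neg h3,
              decide_eq_false h1, decide_eq_false h2, decide_eq_false h3]
          rfl

-- ===== VERDICT (by name: the statement is the Claim_ definition above) =====
theorem check_actions_spec : Claim_equal_check_actions := by
  intro cavity _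
  unfold Spec_check_actions check_actions check_actions_alt
  rw [check_actions_foldl]
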